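-- pv_equiv track=rewrite | github.com/jeffrey-xiao/competitive-programming | src/contest/acm/ACM_Greater_New_York_2015_G.py | _result
-- ===== SOURCE A (Python) =====
-- RES = {}
--
-- def result(n, m, k):
--     if (n, m, k) in RES:
--         return RES[n,m,k]
--     else:
--         RES[n,m,k] = _result(n, m, k)
--         return RES[n,m,k]
--
-- def _result(n, m, k):
--     if n == 0:
--         return 1
--     else:
--         s = 0
--         for l in range(1, n+1):
--             if (l - m) % k == 0:
--                 continue
--             s += result(n - l, m, k)
--         return s
-- ===== SOURCE B (Python) =====
-- def _result(n, m, k):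
--     # Linear DP: f(i) = (sum of f(0..i-1)) - (sum of f(j) for j < i with j % k == (i-m) % k),
--     # maintained with a running total and per-residue-class sums.
--     if n < 0:
--         return 0
--     total = 0            # sum of f(0..i)
--     by_res = {}          # residue r -> sum of f(j) for processed j with j % k == r
--     f = 1                # f(0)
--     for i in range(n):
--         total += f
--         r = i % k
--         by_res[r] = by_res.get(r, 0) + f
--         f = total - by_res.get((i + 1 - m) % k, 0)
--     return f
-- ===== Notes on version B (the rewrite author's own statement) =====
-- stated objective: faster
-- what changed: Replaces the recursion that sums result(n-l) over all allowed parts l (quadratic work even with the memo dict) by a single forward DP pass keeping a running total of all previous values plus per-residue-class (mod k) partial sums, so each f(i) is one subtraction.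
import Mathlib
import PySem

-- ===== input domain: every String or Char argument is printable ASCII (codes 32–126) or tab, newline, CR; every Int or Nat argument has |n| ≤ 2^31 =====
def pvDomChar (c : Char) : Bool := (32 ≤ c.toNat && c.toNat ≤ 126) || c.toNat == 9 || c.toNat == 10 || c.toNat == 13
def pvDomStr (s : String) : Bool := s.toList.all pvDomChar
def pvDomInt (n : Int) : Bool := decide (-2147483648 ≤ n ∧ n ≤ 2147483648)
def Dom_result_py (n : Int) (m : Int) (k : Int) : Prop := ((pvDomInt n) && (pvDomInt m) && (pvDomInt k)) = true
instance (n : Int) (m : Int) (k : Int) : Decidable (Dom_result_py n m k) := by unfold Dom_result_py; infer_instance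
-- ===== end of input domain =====

-- B replaces A's quadratic-work recursion (sum over all smaller arguments at every level) by a
-- single linear pass keeping a running total and per-residue-class (mod k) partial sums.
-- A's Python memoises through a global dict `RES`; the memo does not change the returned value,
-- so port A is the plain recursion it computes.

-- ===== PORT A =====
-- Python A is the pair result/_result: `result` memoises through the global dict RES and
-- `_result` does the work; the port threads RES explicitly (same lookups, same inserts).
mutual
-- result(n, m, k): memo wrapper
def resultA (memo : PySem.Dict (Int × Int × Int) Int) (n : Int) (m : Int) (k : Int) :
    Int × PySem.Dict (Int × Int × Int) Int :=
  if memo.contains (n, m, k) then (memo.getD (n, m, k) 0, memo)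
  else
    let r := resultA_ memo n m k
    let memo2 := r.2.insert (n, m, k) r.1
    (memo2.getD (n, m, k) 0, memo2)
termination_by 2 * n.toNat + 1
decreasing_by omega

-- _result(n, m, k)
def resultA_ (memo : PySem.Dict (Int × Int × Int) Int) (n : Int) (m : Int) (k : Int) :
    Int × PySem.Dict (Int × Int × Int) Int :=
  if n = 0 then (1, memo)
  else
    -- for l in range(1, n+1): if (l - m) % k == 0: continue; s += result(n - l, m, k)
    (PySem.List.pyRange 1 (n + 1) 1).attach.foldl
      (fun st l =>
        if PySem.Int.mod (l.1 - m) k = 0 then st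
        else
          let r := resultA st.2 (n - l.1) m k
          (st.1 + r.1, r.2))
      (0, memo)
termination_by 2 * n.toNat
decreasing_by
  have h := PySem.List.mem_pyRange_one.mp l.2
  omega
end

-- _result called with the memo dict empty (its contents never change any returned value)
def result_py (n : Int) (m : Int) (k : Int) : Int :=
  (resultA_ PySem.Dict.empty n m k).1

-- ===== PORT B =====
-- one loop iteration of Source B: total += f; by_res[i % k] += f; f = total - by_res.get((i+1-m) % k, 0)
def bStep (m : Int) (k : Int) (st : Int × PySem.Dict Int Int × Int) (i : Int) :
    Int × PySem.Dict Int Int × Int :=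
  let total := st.1 + st.2.2
  let r := PySem.Int.mod i k
  let byRes := st.2.1.insert r (st.2.1.getD r 0 + st.2.2)
  (total, byRes, total - byRes.getD (PySem.Int.mod (i + 1 - m) k) 0)

def result_py_alt (n : Int) (m : Int) (k : Int) : Int :=
  if n < 0 then 0
  else
    ((PySem.List.pyRange 0 n 1).foldl (bStep m k) (0, PySem.Dict.empty, 1)).2.2

-- ===== PRECONDITION & SPEC =====
-- Pre_ excludes exactly the inputs where Python A raises ZeroDivisionError:
-- k = 0 together with n ≥ 1 (for n ≤ 0 the modulo is never evaluated and A returns).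
def Pre_result_py (n : Int) (m : Int) (k : Int) : Prop := n < 1 ∨ k ≠ 0
instance (n : Int) (m : Int) (k : Int) : Decidable (Pre_result_py n m k) := by
  unfold Pre_result_py; infer_instance

def pvWitness_result_py : Int × Int × Int := (6, 1, 2)

def Spec_result_py (n : Int) (m : Int) (k : Int) (out : Int) : Prop := out = result_py_alt n m k
instance (n : Int) (m : Int) (k : Int) (out : Int) : Decidable (Spec_result_py n m k out) := by
  unfold Spec_result_py; infer_instance

-- ===== CLAIM (what is proved, stated in full; the proofs are below) =====
def Claim_equal_result_py : Prop := ∀ (n : Int) (m : Int) (k : Int),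
  Dom_result_py n m k → Pre_result_py n m k → Spec_result_py n m k (result_py n m k)

-- ===== LEMMAS AND PROOFS =====

-- the common mathematical value: number of compositions of N avoiding parts ≡ m (mod k)
def gA (m : Int) (k : Int) : Nat → Int
  | 0 => 1
  | (N + 1) =>
    ((List.range (N + 1)).attach.map
      (fun i => if k ∣ ((N : Int) + 1 - i.1 - m) then 0 else gA m k i.1)).sum
decreasing_by exact List.mem_range.mp i.2

theorem gA_succ (m k : Int) (N : Nat) :
    gA m k (N + 1) = ∑ i ∈ Finset.range (N + 1),
      (if k ∣ ((N : Int) + 1 - i - m) then 0 else gA m k i) := by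
  rw [gA]
  rw [show ((List.range (N + 1)).attach.map
      (fun i => if k ∣ ((N : Int) + 1 - i.1 - m) then 0 else gA m k i.1)).sum
    = ((List.range (N + 1)).map
      (fun (i : Nat) => if k ∣ ((N : Int) + 1 - (i : Int) - m) then 0 else gA m k i)).sum from by
    simp]
  rfl

-- A's recursion computes gA
-- the recursive sum over allowed parts, valued in gA, is gA of the next index
theorem sum_eq_gA (m k : Int) (N : Nat) :
    ((PySem.List.pyRange 1 (((N : Int) + 1) + 1) 1).map
      (fun l => if PySem.Int.mod (l - m) k = 0 then 0
        else gA m k (((N : Int) + 1) - l).toNat)).sum = gA m k (N + 1) := by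
  rw [PySem.List.pyRange_one]
  simp only [List.map_map]
  have htn : (((N : Int) + 1 + 1) - 1).toNat = N + 1 := by omega
  rw [htn]
  show (∑ j ∈ Finset.range (N + 1),
      (if PySem.Int.mod ((1 : Int) + (j : Int) - m) k = 0 then 0
       else gA m k (((N : Int) + 1 - (1 + (j : Int))).toNat))) = gA m k (N + 1)
  rw [gA_succ]
  rw [← Finset.sum_range_reflect
    (fun i => if k ∣ ((N : Int) + 1 - i - m) then 0 else gA m k i)]
  apply Finset.sum_congr rfl
  intro j hj
  have hjN : j ≤ N := Nat.lt_succ_iff.mp (Finset.mem_range.mp hj)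
  simp only [Nat.add_sub_cancel]
  have h1 : ((N - j : Nat) : Int) = (N : Int) - j := by omega
  rw [show (((N : Int) + 1 - (1 + (j : Int))).toNat) = N - j from by omega]
  rw [h1]
  rw [show (N : Int) + 1 - ((N : Int) - (j : Int)) - m = 1 + (j : Int) - m from by ring]
  simp only [PySem.Int.mod_eq_zero_iff_dvd]

-- what a correct memo entry must hold
def svalA (p : Int × Int × Int) : Int := if p.1 < 0 then 0 else gA p.2.1 p.2.2 p.1.toNat
def GoodMemo (d : PySem.Dict (Int × Int × Int) Int) : Prop :=
  ∀ p v, d.get? p = some v → v = svalA p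

theorem goodMemo_empty : GoodMemo PySem.Dict.empty := by
  intro p v h
  rw [PySem.Dict.get?_empty] at h
  cases h

-- the loop body of resultA_, named for the proofs
def stepA (m k n : Int) (st : Int × PySem.Dict (Int × Int × Int) Int) (l : Int) :
    Int × PySem.Dict (Int × Int × Int) Int :=
  if PySem.Int.mod (l - m) k = 0 then st
  else
    let r := resultA st.2 (n - l) m k
    (st.1 + r.1, r.2)

-- invariant of A's summation loop: the accumulator collects gA values, the memo stays good
theorem foldA_inv (m k n : Int)
    (hIH : ∀ (j : Nat), (j : Int) < n → ∀ d, GoodMemo d →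
      (resultA d (j : Int) m k).1 = gA m k j ∧ GoodMemo (resultA d (j : Int) m k).2) :
    ∀ (xs : List Int), (∀ l ∈ xs, 1 ≤ l ∧ l ≤ n) → ∀ (init : Int) d, GoodMemo d →
      (xs.foldl (stepA m k n) (init, d)).1
        = init + (xs.map (fun l => if PySem.Int.mod (l - m) k = 0 then 0
            else gA m k (n - l).toNat)).sum
      ∧ GoodMemo (xs.foldl (stepA m k n) (init, d)).2 := by
  intro xs
  induction xs with
  | nil => intro _ init d hG; exact ⟨by simp, hG⟩
  | cons x xs ihx =>
    intro hb init d hG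
    obtain ⟨hx1, hx2⟩ := hb x List.mem_cons_self
    have hbt : ∀ l ∈ xs, 1 ≤ l ∧ l ≤ n := fun l hl => hb l (List.mem_cons_of_mem x hl)
    simp only [List.foldl_cons, List.map_cons, List.sum_cons]
    by_cases hc : PySem.Int.mod (x - m) k = 0
    · rw [show stepA m k n (init, d) x = (init, d) from by rw [stepA, if_pos hc]]
      obtain ⟨hv, hG'⟩ := ihx hbt init d hG
      exact ⟨by rw [hv, if_pos hc, zero_add], hG'⟩
    · rw [show stepA m k n (init, d) x
          = (init + (resultA d (n - x) m k).1, (resultA d (n - x) m k).2) from by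
        rw [stepA, if_neg hc]]
      have hj : (((n - x).toNat : Nat) : Int) = n - x := by omega
      have hlt : (((n - x).toNat : Nat) : Int) < n := by omega
      obtain ⟨hv1, hG1⟩ := hIH (n - x).toNat hlt d hG
      rw [hj] at hv1 hG1
      obtain ⟨hv2, hG2⟩ := ihx hbt (init + (resultA d (n - x) m k).1) (resultA d (n - x) m k).2 hG1
      refine ⟨?_, hG2⟩
      rw [hv2, hv1, if_neg hc]
      ring

-- both Python functions return gA and leave the memo good
theorem memo_good (m k : Int) : ∀ N : Nat, ∀ memo, GoodMemo memo →
    ((resultA_ memo (N : Int) m k).1 = gA m k N ∧ GoodMemo (resultA_ memo (N : Int) m k).2)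
    ∧ ((resultA memo (N : Int) m k).1 = gA m k N ∧ GoodMemo (resultA memo (N : Int) m k).2) := by
  intro N
  induction N using Nat.strong_induction_on with
  | _ N ih =>
    intro memo hG
    have hIH : ∀ (j : Nat), (j : Int) < (N : Int) → ∀ d, GoodMemo d →
        (resultA d (j : Int) m k).1 = gA m k j ∧ GoodMemo (resultA d (j : Int) m k).2 := by
      intro j hj d hGd
      exact (ih j (by omega) d hGd).2
    have h_ : (resultA_ memo (N : Int) m k).1 = gA m k N
        ∧ GoodMemo (resultA_ memo (N : Int) m k).2 := by
      match N, hIH with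
      | 0, _ => rw [resultA_.eq_def]; exact ⟨by simp [gA], by simpa using hG⟩
      | N' + 1, hIH =>
        rw [resultA_.eq_def, if_neg (by push_cast; omega)]
        rw [show (fun (st : Int × PySem.Dict (Int × Int × Int) Int)
              (l : {x // x ∈ PySem.List.pyRange 1 (((N' + 1 : Nat) : Int) + 1) 1}) =>
            if PySem.Int.mod (l.1 - m) k = 0 then st
            else
              let r := resultA st.2 (((N' + 1 : Nat) : Int) - l.1) m k
              (st.1 + r.1, r.2))
          = (fun st l => stepA m k ((N' + 1 : Nat) : Int) st l.1) from rfl]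
        rw [List.foldl_attach (f := stepA m k ((N' + 1 : Nat) : Int))]
        have hb : ∀ l ∈ PySem.List.pyRange 1 (((N' + 1 : Nat) : Int) + 1) 1,
            1 ≤ l ∧ l ≤ ((N' + 1 : Nat) : Int) := by
          intro l hl
          have := PySem.List.mem_pyRange_one.mp hl
          omega
        obtain ⟨hv, hG'⟩ := foldA_inv m k ((N' + 1 : Nat) : Int) hIH
          (PySem.List.pyRange 1 (((N' + 1 : Nat) : Int) + 1) 1) hb 0 memo hG
        refine ⟨?_, hG'⟩
        rw [hv, zero_add]
        have hcast : ((N' + 1 : Nat) : Int) = (N' : Int) + 1 := by push_cast; ring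
        rw [hcast]
        exact sum_eq_gA m k N'
    refine ⟨h_, ?_⟩
    rw [resultA.eq_def]
    by_cases hc : memo.contains ((N : Int), m, k)
    · rw [if_pos hc]
      have hsome : (memo.get? ((N : Int), m, k)).isSome := by
        rw [← PySem.Dict.contains_eq_isSome_get?]; exact hc
      obtain ⟨v, hv⟩ := Option.isSome_iff_exists.mp hsome
      refine ⟨?_, hG⟩
      show memo.getD ((N : Int), m, k) 0 = gA m k N
      rw [PySem.Dict.getD_of_get?_eq_some memo 0 hv, hG _ _ hv]
      simp [svalA]
    · rw [if_neg hc]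
      refine ⟨?_, ?_⟩
      · show ((resultA_ memo (N : Int) m k).2.insert ((N : Int), m, k)
            (resultA_ memo (N : Int) m k).1).getD ((N : Int), m, k) 0 = gA m k N
        rw [PySem.Dict.getD_insert_self, h_.1]
      · show GoodMemo ((resultA_ memo (N : Int) m k).2.insert ((N : Int), m, k)
            (resultA_ memo (N : Int) m k).1)
        intro p v hpv
        rw [PySem.Dict.get?_insert] at hpv
        by_cases hp : p = ((N : Int), m, k)
        · rw [if_pos hp] at hpv
          cases hpv
          rw [h_.1, hp]
          simp [svalA]
        · rw [if_neg hp] at hpv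
          exact h_.2 _ _ hpv

-- running total and per-residue partial sums of gA
def Tsum (m k : Int) (i : Nat) : Int := ∑ j ∈ Finset.range i, gA m k j
def Ssum (m k : Int) (i : Nat) (r : Int) : Int :=
  ∑ j ∈ Finset.range i, if PySem.Int.mod (j : Int) k = r then gA m k j else 0

-- floor-mod congruence: equal remainders mod k ↔ k divides the difference
theorem mod_eq_mod_iff_dvd_sub (a b k : Int) (hk : k ≠ 0) :
    PySem.Int.mod a k = PySem.Int.mod b k ↔ k ∣ (a - b) := by
  have ha := PySem.Int.floordiv_mul_add_mod a k
  have hb := PySem.Int.floordiv_mul_add_mod b k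
  constructor
  · intro h
    exact ⟨PySem.Int.floordiv a k - PySem.Int.floordiv b k, by linear_combination -ha + hb + h⟩
  · rintro ⟨c, hc⟩
    have hd : PySem.Int.mod a k - PySem.Int.mod b k
        = k * (c - PySem.Int.floordiv a k + PySem.Int.floordiv b k) := by
      linear_combination hc + ha - hb
    have habs : |PySem.Int.mod a k - PySem.Int.mod b k| < |k| := by
      rcases lt_or_gt_of_ne hk with hneg | hpos
      · have h1 := PySem.Int.mod_neg_bounds a hneg
        have h2 := PySem.Int.mod_neg_bounds b hneg
        rw [abs_of_neg hneg, abs_lt]; omega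
      · have h1 := PySem.Int.mod_nonneg a hpos
        have h2 := PySem.Int.mod_lt a hpos
        have h3 := PySem.Int.mod_nonneg b hpos
        have h4 := PySem.Int.mod_lt b hpos
        rw [abs_of_pos hpos, abs_lt]; omega
    have := Int.eq_zero_of_abs_lt_dvd ((abs_dvd _ _).mpr ⟨_, hd⟩) habs
    omega

-- the DP recurrence: gA (i+1) = (sum of all gA below) minus (the excluded residue class)
theorem gA_succ_dp (m k : Int) (hk : k ≠ 0) (i : Nat) :
    gA m k (i + 1) = Tsum m k (i + 1) - Ssum m k (i + 1) (PySem.Int.mod ((i : Int) + 1 - m) k) := by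
  rw [gA_succ, Tsum, Ssum, ← Finset.sum_sub_distrib]
  apply Finset.sum_congr rfl
  intro j _
  have hcong := mod_eq_mod_iff_dvd_sub (j : Int) ((i : Int) + 1 - m) k hk
  by_cases h : k ∣ ((i : Int) + 1 - j - m)
  · have : PySem.Int.mod (j : Int) k = PySem.Int.mod ((i : Int) + 1 - m) k := by
      rw [hcong]
      have : ((j : Int) - ((i : Int) + 1 - m)) = -(((i : Int) + 1 - j - m)) := by ring
      rw [this]; exact h.neg_right
    simp [h, this]
  · have : ¬ PySem.Int.mod (j : Int) k = PySem.Int.mod ((i : Int) + 1 - m) k := by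
      rw [hcong]
      intro hc
      apply h
      have : ((i : Int) + 1 - j - m) = -((j : Int) - ((i : Int) + 1 - m)) := by ring
      rw [this]; exact hc.neg_right
    simp [h, this]

-- B's loop invariant
theorem B_inv (m k : Int) (hk : k ≠ 0) (i : Nat) :
    ((PySem.List.pyRange 0 (i : Int) 1).foldl (bStep m k) (0, PySem.Dict.empty, 1)).1
        = Tsum m k i
    ∧ (∀ r, ((PySem.List.pyRange 0 (i : Int) 1).foldl (bStep m k)
        (0, PySem.Dict.empty, 1)).2.1.getD r 0 = Ssum m k i r)
    ∧ ((PySem.List.pyRange 0 (i : Int) 1).foldl (bStep m k) (0, PySem.Dict.empty, 1)).2.2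
        = gA m k i := by
  induction i with
  | zero =>
    rw [PySem.List.pyRange_one_eq_nil (by omega)]
    refine ⟨by simp [Tsum], fun r => by simp [Ssum, PySem.Dict.getD_empty], by simp [gA]⟩
  | succ i ih =>
    obtain ⟨hT, hS, hf⟩ := ih
    have : ((i : Int) + 1) = (((i : Nat) + 1 : Nat) : Int) := by push_cast; ring
    rw [← this, PySem.List.pyRange_one_succ_right (by omega), List.foldl_append]
    set st := (PySem.List.pyRange 0 (i : Int) 1).foldl (bStep m k) (0, PySem.Dict.empty, 1)
    simp only [List.foldl_cons, List.foldl_nil]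
    have hT' : (bStep m k st (i : Int)).1 = Tsum m k (i + 1) := by
      simp only [bStep, hT, hf, Tsum, Finset.sum_range_succ]
    have hS' : ∀ r, (bStep m k st (i : Int)).2.1.getD r 0 = Ssum m k (i + 1) r := by
      intro r
      by_cases h : r = PySem.Int.mod (i : Int) k
      · subst h
        simp only [bStep]
        rw [PySem.Dict.getD_insert, if_pos rfl, hS, hf]
        simp only [Ssum, Finset.sum_range_succ]
        simp
      · simp only [bStep]
        rw [PySem.Dict.getD_insert, if_neg h, hS]
        simp only [Ssum, Finset.sum_range_succ]
        rw [if_neg (fun hc => h hc.symm)]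
        simp
    refine ⟨hT', hS', ?_⟩
    show (bStep m k st (i : Int)).1 - (bStep m k st (i : Int)).2.1.getD
        (PySem.Int.mod ((i : Int) + 1 - m) k) 0 = gA m k (i + 1)
    rw [hT', hS', gA_succ_dp m k hk i]

-- ===== VERDICT (by name: the statement is the Claim_ definition above) =====
theorem result_py_spec : Claim_equal_result_py := by
  intro n m k _ hpre
  unfold Spec_result_py
  rcases lt_trichotomy n 0 with hneg | hzero | hpos
  · -- n < 0 : A's loop range is empty, B returns 0
    rw [result_py, resultA_, if_neg (by omega), PySem.List.pyRange_one_eq_nil (by omega)]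
    rw [result_py_alt, if_pos hneg]
    simp
  · subst hzero
    rw [result_py, resultA_, if_pos rfl, result_py_alt, if_neg (by omega)]
    rw [show (0 : Int) = ((0 : Nat) : Int) from rfl, PySem.List.pyRange_one_eq_nil (by omega)]
    simp
  · have hk : k ≠ 0 := by
      cases hpre with
      | inl h => omega
      | inr h => exact h
    have hn : n = (n.toNat : Int) := by omega
    rw [result_py, hn, (memo_good m k n.toNat PySem.Dict.empty goodMemo_empty).1.1,
      result_py_alt, if_neg (by omega)]
    exact ((B_inv m k hk n.toNat).2.2).symm
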